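-- pv_equiv track=rewrite | github.com/patr1ckzhu/EEG_MI_CSP_LDA_Project | src/evaluate_with_train_test_split.py | find_matching_channels
-- ===== SOURCE A (Python) =====
-- def normalize_channel_name(ch_name):
--     """Normalize channel names."""
--     ch_clean = ch_name.rstrip('.').upper()
--     ch_clean = ch_clean.replace('..', '')
--     ch_clean = ch_clean.replace('Z', 'z')
--     return ch_clean
--
-- def find_matching_channels(available_channels, requested_channels):
--     """Find matching channels."""
--     channel_map = {}
--     for avail_ch in available_channels:
--         norm_name = normalize_channel_name(avail_ch)
--         channel_map[norm_name] = avail_ch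
--
--     matched = []
--     for req_ch in requested_channels:
--         norm_req = normalize_channel_name(req_ch)
--         if norm_req in channel_map:
--             matched.append(channel_map[norm_req])
--
--     return matched
-- ===== SOURCE B (Python) =====
-- def normalize_channel_name(ch_name):
--     """Normalize channel names."""
--     ch_clean = ch_name.rstrip('.').upper()
--     ch_clean = ch_clean.replace('..', '')
--     ch_clean = ch_clean.replace('Z', 'z')
--     return ch_clean
--
-- def find_matching_channels(available_channels, requested_channels):
--     """Find matching channels by scanning the available list per request (last match wins)."""
--     matched = []
--     for req_ch in requested_channels:
--         norm_req = normalize_channel_name(req_ch)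
--         best = None
--         for avail_ch in available_channels:
--             if normalize_channel_name(avail_ch) == norm_req:
--                 best = avail_ch
--         if best is not None:
--             matched.append(best)
--     return matched
-- ===== Notes on version B (the rewrite author's own statement) =====
-- stated objective: alternative
-- what changed: Drops the precomputed normalized-name dict; for each requested channel B scans the available list directly, keeping the last available channel whose normalized name matches (matching the dict's last-insertion-wins behaviour).
import Mathlib
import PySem

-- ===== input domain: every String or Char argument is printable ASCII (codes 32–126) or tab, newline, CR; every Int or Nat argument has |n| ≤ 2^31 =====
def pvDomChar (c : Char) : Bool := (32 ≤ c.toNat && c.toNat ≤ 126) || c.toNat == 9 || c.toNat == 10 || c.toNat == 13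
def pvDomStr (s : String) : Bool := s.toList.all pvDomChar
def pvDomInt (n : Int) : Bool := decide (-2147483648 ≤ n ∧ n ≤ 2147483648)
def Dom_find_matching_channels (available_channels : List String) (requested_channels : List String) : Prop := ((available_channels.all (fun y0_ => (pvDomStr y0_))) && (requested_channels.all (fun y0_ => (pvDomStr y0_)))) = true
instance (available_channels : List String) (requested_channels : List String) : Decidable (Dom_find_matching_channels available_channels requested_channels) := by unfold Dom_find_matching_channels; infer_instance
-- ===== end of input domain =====

-- B replaces A's build-a-normalized-name-dict-then-look-up strategy with a direct
-- per-request scan of the available list keeping the LAST match (objective: alternative).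

-- s.rstrip('.') ported by hand (PySem has no right-only strip with a chars argument):
-- drop trailing '.' characters — exact for any string.
def pyRstripDot (s : String) : String :=
  String.ofList ((s.toList.reverse.dropWhile (fun c => c == '.')).reverse)

-- shared helper normalize_channel_name (identical in both Python sources)
def normalize_channel_name (ch_name : String) : String :=
  let c1 := PySem.Str.upper (pyRstripDot ch_name)
  let c2 := PySem.Str.replace c1 ".." ""
  PySem.Str.replace c2 "Z" "z"

-- ===== PORT A =====
def find_matching_channels (available_channels : List String) (requested_channels : List String) : List String :=
  let channel_map : PySem.Dict String String :=
    available_channels.foldl (fun d avail_ch => d.insert (normalize_channel_name avail_ch) avail_ch) PySem.Dict.empty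
  requested_channels.foldl (fun matched req_ch =>
    let norm_req := normalize_channel_name req_ch
    match channel_map.get? norm_req with
    | some v => matched ++ [v]
    | none => matched) []

-- ===== PORT B =====
def find_matching_channels_alt (available_channels : List String) (requested_channels : List String) : List String :=
  requested_channels.foldl (fun matched req_ch =>
    let norm_req := normalize_channel_name req_ch
    let best := available_channels.foldl
      (fun best avail_ch => if normalize_channel_name avail_ch = norm_req then some avail_ch else best)
      (none : Option String)
    match best with
    | some v => matched ++ [v]
    | none => matched) []

-- ===== PRECONDITION & SPEC =====
def Spec_find_matching_channels (available_channels : List String) (requested_channels : List String) (out : List String) : Prop := out = find_matching_channels_alt available_channels requested_channels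
instance (available_channels : List String) (requested_channels : List String) (out : List String) : Decidable (Spec_find_matching_channels available_channels requested_channels out) := by unfold Spec_find_matching_channels; infer_instance

-- ===== CLAIM (what is proved, stated in full; the proofs are below) =====
def Claim_equal_find_matching_channels : Prop := ∀ (available_channels : List String) (requested_channels : List String), Dom_find_matching_channels available_channels requested_channels → Spec_find_matching_channels available_channels requested_channels (find_matching_channels available_channels requested_channels)

-- ===== LEMMAS AND PROOFS =====

-- Looking up n in the dict built by inserting (norm a, a) over avail equals the
-- last-match fold of B, for any starting dict / starting option related by get?.
theorem dict_fold_get?_eq_lastMatch (avail : List String) (n : String)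
    (d0 : PySem.Dict String String) :
    (avail.foldl (fun d a => d.insert (normalize_channel_name a) a) d0).get? n
      = avail.foldl (fun best a => if normalize_channel_name a = n then some a else best) (d0.get? n) := by
  induction avail generalizing d0 with
  | nil => rfl
  | cons a l ih =>
    have hstep : (d0.insert (normalize_channel_name a) a).get? n
        = (if normalize_channel_name a = n then some a else d0.get? n) := by
      rw [PySem.Dict.get?_insert]
      by_cases h : n = normalize_channel_name a
      · rw [if_pos h, if_pos h.symm]
      · rw [if_neg h, if_neg (fun h' => h h'.symm)]
    simp only [List.foldl_cons]
    rw [ih, hstep]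

-- the two request-folds agree for every accumulator
theorem main_fold (avail : List String) (req : List String) (m : List String) :
    req.foldl (fun matched req_ch =>
      match (avail.foldl (fun d a => d.insert (normalize_channel_name a) a) PySem.Dict.empty).get?
              (normalize_channel_name req_ch) with
      | some v => matched ++ [v]
      | none => matched) m
    = req.foldl (fun matched req_ch =>
      match avail.foldl
              (fun best a => if normalize_channel_name a = normalize_channel_name req_ch then some a else best)
              (none : Option String) with
      | some v => matched ++ [v]
      | none => matched) m := by
  induction req generalizing m with
  | nil => rfl
  | cons r l ih =>
    simp only [List.foldl_cons]
    rw [dict_fold_get?_eq_lastMatch avail (normalize_channel_name r) PySem.Dict.empty,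
        PySem.Dict.get?_empty, ih]

theorem find_matching_channels_spec : Claim_equal_find_matching_channels := by
  intro avail req _
  show find_matching_channels avail req = find_matching_channels_alt avail req
  unfold find_matching_channels find_matching_channels_alt
  exact main_fold avail req []
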